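-- pv_equiv track=rewrite | github.com/fcaponetto/advent_of_code | 2023/d03/02.py | extract_star_positions
-- ===== SOURCE A (Python) =====
-- def is_star(char):
--     return char == '*'
--
-- def extract_star_positions(input_string: str) -> list:
--     """
--     It extracts the start and end position of a star
--     :rtype: list of tuples that include start-end positions
--     """
--     result = []
--     current_symbol = ''
--
--     for i, char in enumerate(input_string):
--         if is_star(char):
--             current_symbol += char
--         elif current_symbol:
--             result.append(i - len(current_symbol))
--             current_symbol = ''
--
--     # trailing number
--     if current_symbol:
--         result.append(len(input_string) - len(current_symbol))
--
--     return result
-- ===== SOURCE B (Python) =====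
-- def extract_star_positions(input_string: str) -> list:
--     """Record the index where each maximal run of '*' begins."""
--     out = []
--     prev = ''
--     for i, char in enumerate(input_string):
--         if char == '*' and prev != '*':
--             out.append(i)
--         prev = char
--     return out
-- ===== Notes on version B (the rewrite author's own statement) =====
-- stated objective: simpler
-- what changed: B emits each run's start index the moment a run begins (a per-position test against just the previous character), replacing A's accumulate-a-star-string-and-flush-at-run-end loop with its separate trailing-run fix-up.
import Mathlib
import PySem

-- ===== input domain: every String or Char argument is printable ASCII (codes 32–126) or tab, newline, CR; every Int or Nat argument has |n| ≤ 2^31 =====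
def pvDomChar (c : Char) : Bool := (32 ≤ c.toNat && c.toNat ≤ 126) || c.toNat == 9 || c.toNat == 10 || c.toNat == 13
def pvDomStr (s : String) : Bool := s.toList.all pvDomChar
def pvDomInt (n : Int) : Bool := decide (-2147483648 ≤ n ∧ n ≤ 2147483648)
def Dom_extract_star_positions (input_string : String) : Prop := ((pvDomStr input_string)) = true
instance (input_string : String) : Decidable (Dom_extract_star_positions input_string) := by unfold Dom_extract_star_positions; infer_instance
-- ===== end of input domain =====

-- B records each '*'-run at its START (tracking only the previous char) instead of A's
-- accumulate-and-flush-at-run-end loop with a trailing flush; objective: simpler.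

-- ===== PORT A =====
def is_star (char : Char) : Bool := char = '*'

-- A's loop body (result, current_symbol as its list of chars)
def stepA (acc : List Int × List Char) (p : Int × Char) : List Int × List Char :=
  if is_star p.2 then (acc.1, acc.2 ++ [p.2])
  else if acc.2 ≠ [] then (acc.1 ++ [p.1 - (acc.2.length : Int)], [])
  else acc

def extract_star_positions (input_string : String) : List Int :=
  let rc := (PySem.List.enumerate input_string.toList).foldl stepA ([], [])
  if rc.2 ≠ [] then rc.1 ++ [PySem.Str.len input_string - (rc.2.length : Int)]
  else rc.1

-- ===== PORT B =====
-- B's loop body: state (out, prev) where prev is the previous char as a (≤1-char) string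
def stepB (acc : List Int × List Char) (p : Int × Char) : List Int × List Char :=
  ((if p.2 = '*' ∧ acc.2 ≠ ['*'] then acc.1 ++ [p.1] else acc.1), [p.2])

def extract_star_positions_alt (input_string : String) : List Int :=
  ((PySem.List.enumerate input_string.toList).foldl stepB ([], [])).1

-- ===== PRECONDITION & SPEC =====
def Spec_extract_star_positions (input_string : String) (out : List Int) : Prop :=
  out = extract_star_positions_alt input_string
instance (input_string : String) (out : List Int) : Decidable (Spec_extract_star_positions input_string out) := by
  unfold Spec_extract_star_positions; infer_instance

-- ===== CLAIM =====
def Claim_equal_extract_star_positions : Prop :=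
  ∀ (input_string : String), Dom_extract_star_positions input_string →
    Spec_extract_star_positions input_string (extract_star_positions input_string)

-- ===== LEMMAS AND PROOFS =====
lemma pv_assoc (i : Int) (n : Nat) : i + ((n : Int) + 1) = i + 1 + (n : Int) := by ring

-- Loop invariant: B's output so far equals A's flushed results plus, if a run is open
-- (cur ≠ []), the start index of that open run; prev = "*" exactly when a run is open.
lemma loop_eq : ∀ (cs : List Char) (i : Int) (res : List Int) (cur prev : List Char),
    (prev = ['*'] ↔ cur ≠ []) →
    (let rc := (PySem.List.enumerate cs i).foldl stepA (res, cur)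
     if rc.2 ≠ [] then rc.1 ++ [(i + (cs.length : Int)) - (rc.2.length : Int)] else rc.1)
    = ((PySem.List.enumerate cs i).foldl stepB
        (res ++ (if cur = [] then [] else [i - (cur.length : Int)]), prev)).1 := by
  intro cs
  induction cs with
  | nil =>
    intro i res cur prev hprev
    by_cases hc : cur = [] <;>
      simp [PySem.List.enumerate_nil, hc]
  | cons c cs ih =>
    intro i res cur prev hprev
    rw [PySem.List.enumerate_cons]
    by_cases hstar : c = '*'
    · by_cases hc : cur = []
      · have hp : prev ≠ ['*'] := by simp [hprev, hc]
        have := ih (i + 1) res ['*'] ['*'] (by simp)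
        simp [stepA, stepB, is_star, hstar, hc, hp, List.foldl] at this ⊢
        rw [pv_assoc i cs.length, ← this]
      · have hp : prev = ['*'] := hprev.mpr hc
        have := ih (i + 1) res (cur ++ ['*']) ['*'] (by simp)
        simp [stepA, stepB, is_star, hstar, hc, hp, List.foldl] at this ⊢
        rw [pv_assoc i cs.length, ← this]
    · by_cases hc : cur = []
      · have := ih (i + 1) res [] [c] (by simp [hstar])
        simp [stepA, stepB, is_star, hstar, hc, List.foldl] at this ⊢
        rw [pv_assoc i cs.length, ← this]
      · have := ih (i + 1) (res ++ [i - (cur.length : Int)]) [] [c] (by simp [hstar])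
        simp [stepA, stepB, is_star, hstar, hc, hprev.mpr hc, List.foldl] at this ⊢
        rw [pv_assoc i cs.length, ← this]

-- ===== VERDICT =====
theorem extract_star_positions_spec : Claim_equal_extract_star_positions := by
  intro s _
  unfold Spec_extract_star_positions extract_star_positions extract_star_positions_alt
  have h := loop_eq s.toList 0 [] [] [] (by simp)
  simp only [zero_add] at h
  simp at h
  rw [PySem.Str.len_eq]
  simpa using h
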